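-- pv_equiv track=rewrite | github.com/mgh3326/programmers_algorithm | courses/30/lessons/120846/main.py | has_valid_pronunciations
-- ===== SOURCE A (Python) =====
-- def has_valid_pronunciations(value, possible_pronunciations):
--     if not value:
--         return True
--     for i, pronunciation in enumerate(possible_pronunciations):
--         if value.startswith(pronunciation):
--             if has_valid_pronunciations(value[len(pronunciation):],
--                                         possible_pronunciations[:i] + possible_pronunciations[i + 1:]):
--                 return True
--     return False
-- ===== SOURCE B (Python) =====
-- def has_valid_pronunciations(value, possible_pronunciations):
--     memo = {}
--     def go(pos, remaining):
--         key = (pos, remaining)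
--         if key in memo:
--             return memo[key]
--         if pos == len(value):
--             res = True
--         else:
--             res = False
--             for k in range(len(remaining)):
--                 p = remaining[k]
--                 if value.startswith(p, pos) and go(pos + len(p), remaining[:k] + remaining[k + 1:]):
--                     res = True
--                     break
--         memo[key] = res
--         return res
--     return go(0, tuple(p for p in possible_pronunciations if p))
-- ===== Notes on version B (the rewrite author's own statement) =====
-- stated objective: alternative
-- what changed: A's recursive backtracking over string slices and rebuilt sublists is replaced by a memoized top-down search keyed on (position in value, tuple of remaining pronunciations), with empty pronunciations (which never affect decomposability) dropped upfront; the problem stays exponential in the worst case, so no speed is claimed.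
import Mathlib
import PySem

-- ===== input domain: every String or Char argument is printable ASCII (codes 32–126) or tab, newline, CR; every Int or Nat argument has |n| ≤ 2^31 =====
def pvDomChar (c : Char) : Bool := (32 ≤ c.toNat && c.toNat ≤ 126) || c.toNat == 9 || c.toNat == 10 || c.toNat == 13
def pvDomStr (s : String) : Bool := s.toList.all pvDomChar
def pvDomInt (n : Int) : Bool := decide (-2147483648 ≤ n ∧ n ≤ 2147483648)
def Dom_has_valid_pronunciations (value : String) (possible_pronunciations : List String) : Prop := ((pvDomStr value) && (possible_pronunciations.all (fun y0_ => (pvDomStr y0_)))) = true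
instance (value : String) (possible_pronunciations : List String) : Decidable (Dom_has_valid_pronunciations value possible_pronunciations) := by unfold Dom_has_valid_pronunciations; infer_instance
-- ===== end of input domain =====

-- B replaces A's recursive backtracking over string slices and rebuilt sublists by a
-- memoized top-down search keyed on (position in value, tuple of remaining pronunciations),
-- with empty pronunciations dropped upfront — objective: alternative.


-- ===== PORT A =====
-- A's recursion, on List Char / List (List Char); the enumerate loop with
-- possible_pronunciations[:i] + possible_pronunciations[i+1:] is carried as (before, rest).
mutual
def hvpA (v : List Char) (pps : List (List Char)) : Bool :=
  if v = [] then true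
  else hvpALoop v [] pps
termination_by (pps.length + 1, 0)

def hvpALoop (v : List Char) (before rest : List (List Char)) : Bool :=
  match rest with
  | [] => false
  | p :: rs =>
    if PySem.Chars.startswith v p
        && hvpA (PySem.List.slice v (some (p.length : Int)) none) (before ++ rs) then true
    else hvpALoop v (before ++ [p]) rs
termination_by (before.length + rest.length, rest.length)
decreasing_by
  all_goals simp_wf
  all_goals rw [Prod.lex_def]
  all_goals omega
end

def has_valid_pronunciations (value : String) (possible_pronunciations : List String) : Bool :=
  hvpA value.toList (possible_pronunciations.map String.toList)

-- ===== PORT B =====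
-- memo : dict keyed by (pos, remaining tuple); empty pronunciations are dropped upfront
-- ('p for p in possible_pronunciations if p'); value.startswith(p, pos) is ported as
-- startswith on (v.drop pos) — exact, since every reached pos satisfies 0 ≤ pos ≤ len(value).
abbrev HvpMemo := PySem.Dict (Nat × List (List Char)) Bool

mutual
def hvpBGo (v : List Char) (pos : Nat) (rem : List (List Char)) (memo : HvpMemo) : Bool × HvpMemo :=
  match PySem.Dict.get? memo (pos, rem) with
  | some b => (b, memo)
  | none =>
    let r :=
      if pos = v.length then (true, memo)
      else hvpBLoop v pos [] rem memo
    (r.1, PySem.Dict.insert r.2 (pos, rem) r.1)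
termination_by (rem.length + 1, 0)

def hvpBLoop (v : List Char) (pos : Nat) (before rest : List (List Char)) (memo : HvpMemo) : Bool × HvpMemo :=
  match rest with
  | [] => (false, memo)
  | p :: rs =>
    if PySem.Chars.startswith (v.drop pos) p then
      let r := hvpBGo v (pos + p.length) (before ++ rs) memo
      if r.1 then (true, r.2) else hvpBLoop v pos (before ++ [p]) rs r.2
    else hvpBLoop v pos (before ++ [p]) rs memo
termination_by (before.length + rest.length, rest.length)
decreasing_by
  all_goals simp_wf
  all_goals rw [Prod.lex_def]
  all_goals omega
end

def has_valid_pronunciations_alt (value : String) (possible_pronunciations : List String) : Bool :=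
  (hvpBGo value.toList 0
    ((possible_pronunciations.map String.toList).filter (fun p => !p.isEmpty))
    PySem.Dict.empty).1

-- ===== PRECONDITION & SPEC =====
def Spec_has_valid_pronunciations (value : String) (possible_pronunciations : List String) (out : Bool) : Prop := out = has_valid_pronunciations_alt value possible_pronunciations
instance (value : String) (possible_pronunciations : List String) (out : Bool) : Decidable (Spec_has_valid_pronunciations value possible_pronunciations out) := by unfold Spec_has_valid_pronunciations; infer_instance

-- ===== CLAIM (what is proved, stated in full; the proofs are below) =====
def Claim_equal_has_valid_pronunciations : Prop := ∀ (value : String) (possible_pronunciations : List String), Dom_has_valid_pronunciations value possible_pronunciations → Spec_has_valid_pronunciations value possible_pronunciations (has_valid_pronunciations value possible_pronunciations)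

-- ===== LEMMAS AND PROOFS =====
-- memo invariant: every cached entry is the corresponding A-value
def HvpInv (v : List Char) (memo : HvpMemo) : Prop :=
  ∀ p r b, PySem.Dict.get? memo (p, r) = some b → b = hvpA (v.drop p) r

lemma hvp_startswith_length {s p : List Char} (h : PySem.Chars.startswith s p = true) :
    p.length ≤ s.length :=
  ((PySem.Chars.startswith_iff s p).mp h).length_le

lemma hvp_correct (v : List Char) :
    (∀ pos rem memo, pos ≤ v.length → HvpInv v memo →
      (hvpBGo v pos rem memo).1 = hvpA (v.drop pos) rem ∧ HvpInv v (hvpBGo v pos rem memo).2) ∧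
    (∀ pos before rest memo, pos ≤ v.length → HvpInv v memo →
      (hvpBLoop v pos before rest memo).1 = hvpALoop (v.drop pos) before rest ∧
        HvpInv v (hvpBLoop v pos before rest memo).2) := by
  refine hvpBGo.mutual_induct v
    (motive1 := fun pos rem memo => pos ≤ v.length → HvpInv v memo →
      (hvpBGo v pos rem memo).1 = hvpA (v.drop pos) rem ∧ HvpInv v (hvpBGo v pos rem memo).2)
    (motive2 := fun pos before rest memo => pos ≤ v.length → HvpInv v memo →
      (hvpBLoop v pos before rest memo).1 = hvpALoop (v.drop pos) before rest ∧
        HvpInv v (hvpBLoop v pos before rest memo).2)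
    ?_ ?_ ?_ ?_ ?_ ?_
  · -- memo hit
    intro pos rem memo b hget hpos hinv
    rw [hvpBGo, hget]
    exact ⟨hinv pos rem b hget, hinv⟩
  · -- memo miss
    intro pos rem memo hget ih hpos hinv
    rw [hvpBGo, hget]
    by_cases hp : pos = v.length
    · -- value exhausted: A returns true as well
      have hdrop : v.drop pos = [] := by
        rw [List.drop_eq_nil_iff]; omega
      have hA : hvpA (v.drop pos) rem = true := by rw [hvpA, if_pos hdrop]
      simp only [if_pos hp]
      refine ⟨hA.symm, ?_⟩
      intro p r b hb
      rw [PySem.Dict.get?_insert] at hb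
      by_cases hk : (p, r) = (pos, rem)
      · rw [if_pos hk] at hb
        obtain ⟨h1, h2⟩ := Prod.mk.injEq .. ▸ hk
        subst h1; subst h2
        simpa [hA] using hb.symm
      · rw [if_neg hk] at hb
        exact hinv p r b hb
    · -- value remains: A goes through its loop
      have hdrop : v.drop pos ≠ [] := by
        rw [Ne, List.drop_eq_nil_iff]; omega
      obtain ⟨hval, hinv2⟩ := ih hpos hinv
      have hA : hvpA (v.drop pos) rem = hvpALoop (v.drop pos) [] rem := by
        rw [hvpA, if_neg hdrop]
      simp only [if_neg hp]
      refine ⟨by rw [hval, hA], ?_⟩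
      intro p r b hb
      rw [PySem.Dict.get?_insert] at hb
      by_cases hk : (p, r) = (pos, rem)
      · rw [if_pos hk] at hb
        obtain ⟨h1, h2⟩ := Prod.mk.injEq .. ▸ hk
        subst h1; subst h2
        rw [hA, ← hval]
        exact (Option.some.injEq .. ▸ hb).symm
      · rw [if_neg hk] at hb
        exact hinv2 p r b hb
  · -- loop: rest exhausted
    intro pos before memo hpos hinv
    rw [hvpBLoop, hvpALoop]
    exact ⟨rfl, hinv⟩
  · -- loop: startswith succeeds and the recursive call returns true
    intro pos before memo p rs hsw r hr ih hpos hinv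
    have hlen : pos + p.length ≤ v.length := by
      have h1 := hvp_startswith_length hsw
      have h2 : (v.drop pos).length = v.length - pos := List.length_drop ..
      omega
    obtain ⟨hval, hinv2⟩ := ih hlen hinv
    have hdd : PySem.List.slice (v.drop pos) (some (p.length : Int)) none
        = v.drop (pos + p.length) := by
      rw [PySem.List.slice_from_natCast, List.drop_drop]
    rw [hvpBLoop, if_pos hsw, hvpALoop, hsw, hdd, ← hval]
    simp only [Bool.true_and]
    have hr' : (hvpBGo v (pos + p.length) (before ++ rs) memo).1 = true := hr
    rw [if_pos hr, if_pos hr']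
    exact ⟨rfl, hinv2⟩
  · -- loop: startswith succeeds but the recursive call returns false
    intro pos before memo p rs hsw r hr ih1 ih2 hpos hinv
    have hlen : pos + p.length ≤ v.length := by
      have h1 := hvp_startswith_length hsw
      have h2 : (v.drop pos).length = v.length - pos := List.length_drop ..
      omega
    obtain ⟨hval, hinv2⟩ := ih1 hlen hinv
    obtain ⟨hval2, hinv3⟩ := ih2 hpos hinv2
    have hdd : PySem.List.slice (v.drop pos) (some (p.length : Int)) none
        = v.drop (pos + p.length) := by
      rw [PySem.List.slice_from_natCast, List.drop_drop]
    rw [hvpBLoop, if_pos hsw, hvpALoop, hsw, hdd, ← hval]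
    simp only [Bool.true_and]
    have hr' : ¬ (hvpBGo v (pos + p.length) (before ++ rs) memo).1 = true := hr
    rw [if_neg hr, if_neg hr']
    exact ⟨hval2, hinv3⟩
  · -- loop: startswith fails
    intro pos before memo p rs hsw ih hpos hinv
    obtain ⟨hval, hinv2⟩ := ih hpos hinv
    rw [hvpBLoop, if_neg hsw, hvpALoop]
    simp only [Bool.not_eq_true] at hsw
    simp only [hsw, Bool.false_and, Bool.false_eq_true, if_false]
    exact ⟨hval, hinv2⟩

-- A's loop tries exactly each index k of rest, with context before ++ rest.eraseIdx k
lemma hvpALoop_char (v : List Char) :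
    ∀ (rest before : List (List Char)),
      hvpALoop v before rest = true ↔
        ∃ k, ∃ h : k < rest.length, PySem.Chars.startswith v rest[k] = true ∧
          hvpA (v.drop rest[k].length) (before ++ rest.eraseIdx k) = true := by
  intro rest
  induction rest with
  | nil => intro before; rw [hvpALoop]; simp
  | cons p rs ih =>
    intro before
    rw [hvpALoop, PySem.List.slice_from_natCast]
    by_cases hc : (PySem.Chars.startswith v p && hvpA (v.drop p.length) (before ++ rs)) = true
    · rw [if_pos hc]
      simp only [Bool.and_eq_true] at hc
      constructor
      · intro _
        exact ⟨0, by simp, by simpa using hc.1, by simpa [List.eraseIdx_cons_zero] using hc.2⟩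
      · intro _; rfl
    · rw [if_neg hc, ih (before ++ [p])]
      constructor
      · rintro ⟨k, hk, h1, h2⟩
        refine ⟨k + 1, by simpa using Nat.succ_lt_succ hk, by simpa using h1, ?_⟩
        simpa [List.eraseIdx_cons_succ, List.append_assoc] using h2
      · rintro ⟨k, hk, h1, h2⟩
        cases k with
        | zero =>
          exfalso; apply hc
          simp only [List.getElem_cons_zero] at h1 h2
          simp only [List.eraseIdx_cons_zero] at h2
          simp [h1, h2]
        | succ j =>
          refine ⟨j, by simp only [List.length_cons] at hk; omega, by simpa using h1, ?_⟩
          simpa [List.eraseIdx_cons_succ, List.append_assoc] using h2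

-- from a successful selection, A's loop finds some first pick
lemma hvpA_witness :
    ∀ (sel pps : List (List Char)) (v : List Char),
      sel.Subperm pps → sel.flatten = v → v ≠ [] →
      ∃ k, ∃ h : k < pps.length, PySem.Chars.startswith v pps[k] = true ∧
        ∃ sel' : List (List Char), sel'.Subperm (pps.eraseIdx k) ∧ sel'.flatten = v.drop pps[k].length := by
  intro sel
  induction sel with
  | nil =>
    intro pps v _ hfl hne
    exact absurd hfl.symm (by simpa using hne)
  | cons p sel'' ih =>
    intro pps v hsub hfl hne
    by_cases hp : p = []
    · subst hp
      exact ih pps v ((List.sublist_cons_self [] sel'').subperm.trans hsub)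
        (by simpa using hfl) hne
    · have hmem : p ∈ pps := hsub.subset (List.mem_cons_self ..)
      obtain ⟨k, hk, hpk⟩ := List.getElem_of_mem hmem
      have hperm : pps.Perm (pps[k] :: pps.eraseIdx k) :=
        (List.getElem_cons_eraseIdx_perm hk).symm
      have hsub' : sel''.Subperm (pps.eraseIdx k) := by
        have h2 : (p :: sel'').Subperm (pps[k] :: pps.eraseIdx k) :=
          hsub.trans hperm.subperm
        rw [hpk] at h2
        exact (List.subperm_cons p).mp h2
      refine ⟨k, hk, ?_, sel'', hsub', ?_⟩
      · rw [hpk, PySem.Chars.startswith_iff]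
        exact ⟨sel''.flatten, by simpa using hfl⟩
      · rw [hpk, ← hfl]
        simp only [List.flatten_cons]
        exact (List.drop_left ..).symm ▸ rfl

-- characterization of A: decomposable into a subpermutation of the pronunciations
theorem hvpA_char :
    ∀ (pps : List (List Char)) (v : List Char),
      hvpA v pps = true ↔ ∃ sel : List (List Char), sel.Subperm pps ∧ sel.flatten = v := by
  intro pps v
  induction hlen : pps.length using Nat.strong_induction_on generalizing pps v with
  | _ n ih =>
  by_cases hv : v = []
  · subst hv
    rw [hvpA, if_pos rfl]
    exact ⟨fun _ => ⟨[], List.nil_subperm, rfl⟩, fun _ => rfl⟩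
  · rw [hvpA, if_neg hv, hvpALoop_char]
    constructor
    · rintro ⟨k, hk, h1, h2⟩
      rw [List.nil_append] at h2
      have hlt : (pps.eraseIdx k).length < n := by
        rw [List.length_eraseIdx, if_pos hk]; omega
      obtain ⟨sel', hs', hf'⟩ := (ih _ hlt _ _ rfl).mp h2
      refine ⟨pps[k] :: sel', ?_, ?_⟩
      · exact ((List.subperm_cons pps[k]).mpr hs').trans
          (List.getElem_cons_eraseIdx_perm hk).subperm
      · obtain ⟨t, ht⟩ := (PySem.Chars.startswith_iff v pps[k]).mp h1
        rw [← ht] at hf' ⊢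
        rw [List.drop_left] at hf'
        simp [List.flatten_cons, hf']
    · rintro ⟨sel, hs, hf⟩
      obtain ⟨k, hk, h1, sel', hs', hf'⟩ := hvpA_witness sel pps v hs hf hv
      refine ⟨k, hk, h1, ?_⟩
      rw [List.nil_append]
      have hlt : (pps.eraseIdx k).length < n := by
        rw [List.length_eraseIdx, if_pos hk]; omega
      exact (ih _ hlt _ _ rfl).mpr ⟨sel', hs', hf'⟩

lemma hvp_flatten_filter (sel : List (List Char)) :
    (sel.filter (fun p => !p.isEmpty)).flatten = sel.flatten := by
  induction sel with
  | nil => rfl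
  | cons p sel ih =>
    by_cases hp : p = []
    · subst hp; simpa using ih
    · rw [List.filter_cons_of_pos (by simpa using hp)]
      simp [ih]

-- dropping empty pronunciations does not change A's answer
lemma hvpA_filter (v : List Char) (pps : List (List Char)) :
    hvpA v (pps.filter (fun p => !p.isEmpty)) = hvpA v pps := by
  rw [Bool.eq_iff_iff, hvpA_char, hvpA_char]
  constructor
  · rintro ⟨sel, hs, hf⟩
    exact ⟨sel, hs.trans List.filter_sublist.subperm, hf⟩
  · rintro ⟨sel, hs, hf⟩
    exact ⟨sel.filter (fun p => !p.isEmpty), hs.filter _,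
      by rw [hvp_flatten_filter, hf]⟩

theorem hvp_main (value : String) (pps : List String) :
    has_valid_pronunciations value pps = has_valid_pronunciations_alt value pps := by
  unfold has_valid_pronunciations has_valid_pronunciations_alt
  have h := ((hvp_correct value.toList).1 0
      ((pps.map String.toList).filter (fun p => !p.isEmpty)) PySem.Dict.empty
      (Nat.zero_le _) (by intro p r b hb; simp [PySem.Dict.get?_empty] at hb)).1
  simp only [List.drop_zero] at h
  rw [h, hvpA_filter]

-- ===== VERDICT (by name: the statement is the Claim_ definition above) =====
theorem has_valid_pronunciations_spec : Claim_equal_has_valid_pronunciations := by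
  intro value pps _
  unfold Spec_has_valid_pronunciations
  exact hvp_main value pps
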